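-- pv_equiv track=rewrite | github.com/WinrichSy/HackerRank-Solutions | Python/PilingUp.py | stackable
-- ===== SOURCE A (Python) =====
-- def stackable(lst):
--     ans = 'Yes'
--     prev = max([lst[0],lst[-1]])
--     if prev == lst[0]:
--         del lst[0]
--     else:
--         del lst[-1]
--
--     while(lst != []):
--         new_max = max([lst[0], lst[-1]])
--         if new_max <= prev:
--             prev = new_max
--             if prev == lst[0]:
--                 del lst[0]
--             else:
--                 del lst[-1]
--         elif new_max > prev:
--             ans = 'No'
--             break
--
--     return ans
-- ===== SOURCE B (Python) =====
-- def stackable(lst):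
--     # Single left-to-right pass: stackable iff no descent ever follows an ascent
--     # (the list is non-increasing, then non-decreasing). Does not mutate lst.
--     rising = False
--     prev = lst[0]
--     for x in lst[1:]:
--         if x > prev:
--             rising = True
--         elif rising and x < prev:
--             return 'No'
--         prev = x
--     return 'Yes'
-- ===== Notes on version B (the rewrite author's own statement) =====
-- stated objective: faster
-- what changed: Replaced the destructive two-ended greedy (repeatedly comparing and deleting the larger of the first and last elements, where each front deletion costs O(n)) by a single left-to-right pass that rejects exactly when a descent follows an ascent (the list must be non-increasing then non-decreasing); B also does not mutate the input.
import Mathlib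
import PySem

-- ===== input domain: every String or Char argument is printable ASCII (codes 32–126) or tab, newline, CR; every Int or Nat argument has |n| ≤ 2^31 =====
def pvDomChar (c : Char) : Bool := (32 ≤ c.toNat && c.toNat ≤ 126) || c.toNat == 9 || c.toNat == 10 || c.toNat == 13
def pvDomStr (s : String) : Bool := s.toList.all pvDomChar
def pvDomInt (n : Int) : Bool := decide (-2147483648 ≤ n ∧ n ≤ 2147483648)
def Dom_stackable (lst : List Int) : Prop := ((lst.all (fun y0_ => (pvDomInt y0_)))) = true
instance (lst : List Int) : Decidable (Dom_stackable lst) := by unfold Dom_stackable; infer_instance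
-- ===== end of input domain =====

-- B: one left-to-right pass ("no descent after an ascent") instead of A's destructive
-- two-ended greedy with del; return-value equivalence only (A mutates its argument, B does not).


-- ===== PORT A =====
-- the while-loop: state is the (shrinking) list and prev; 'ans = No; break' becomes returning "No"
def stackableLoop : List Int → Int → String
  | [], _ => "Yes"
  | x :: xs, prev =>
    let h := (PySem.List.pyGet? (x :: xs) 0).getD 0        -- first element
    let l := (PySem.List.pyGet? (x :: xs) (-1)).getD 0     -- last element
    let new_max := max h l
    if new_max ≤ prev then
      if new_max = h then stackableLoop xs new_max          -- del lst[0]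
      else stackableLoop (x :: xs).dropLast new_max         -- del lst[-1]
    else "No"
termination_by lst _ => lst.length
decreasing_by
  · simp
  · simp [List.length_dropLast]

def stackable (lst : List Int) : String :=
  match lst with
  | [] => "Yes"       -- Python A raises IndexError on the empty list; excluded by Pre_stackable
  | x :: xs =>
    let h := (PySem.List.pyGet? (x :: xs) 0).getD 0
    let l := (PySem.List.pyGet? (x :: xs) (-1)).getD 0
    let prev := max h l
    if prev = h then stackableLoop xs prev
    else stackableLoop (x :: xs).dropLast prev

-- ===== PORT B =====
-- the for-loop over lst[1:] with state (rising, prev)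
def stackableAltLoop : List Int → Bool → Int → String
  | [], _, _ => "Yes"
  | x :: xs, rising, prev =>
    if x > prev then stackableAltLoop xs true x
    else if rising ∧ x < prev then "No"
    else stackableAltLoop xs rising x

def stackable_alt (lst : List Int) : String :=
  match lst with
  | [] => "Yes"       -- Python B raises IndexError on the empty list; excluded by Pre_stackable
  | x :: xs => stackableAltLoop xs false x    -- prev = first element, iterate over the rest

-- ===== PRECONDITION & SPEC =====
-- Both Pythons raise IndexError (first-element access) on the empty list; Pre_ excludes exactly that input.
def Pre_stackable (lst : List Int) : Prop := lst ≠ []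
instance (lst : List Int) : Decidable (Pre_stackable lst) := by unfold Pre_stackable; infer_instance
def pvWitness_stackable : List Int := [4, 3, 1, 2, 5]

def Spec_stackable (lst : List Int) (out : String) : Prop := out = stackable_alt lst
instance (lst : List Int) (out : String) : Decidable (Spec_stackable lst out) := by unfold Spec_stackable; infer_instance

-- ===== CLAIM (what is proved, stated in full; the proofs are below) =====
def Claim_equal_stackable : Prop := ∀ (lst : List Int), Dom_stackable lst → Pre_stackable lst → Spec_stackable lst (stackable lst)

-- ===== LEMMAS AND PROOFS =====

-- "valley": a non-increasing block followed by a non-decreasing block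
def IsValley (l : List Int) : Prop :=
  ∃ as bs : List Int, l = as ++ bs ∧ as.Pairwise (· ≥ ·) ∧ bs.Pairwise (· ≤ ·)

theorem isValley_nil : IsValley [] := ⟨[], [], rfl, .nil, .nil⟩

theorem isValley_sublist {l l' : List Int} (h : List.Sublist l' l) (hv : IsValley l) :
    IsValley l' := by
  obtain ⟨as, bs, rfl, ha, hb⟩ := hv
  obtain ⟨xs, ys, rfl, hx, hy⟩ := List.sublist_append_iff.mp h
  exact ⟨xs, ys, rfl, ha.sublist hx, hb.sublist hy⟩

theorem pairwise_le_getLast? {bs : List Int} (h : bs.Pairwise (· ≤ ·)) {y : Int}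
    (hy : y ∈ bs) : ∀ z ∈ bs.getLast?, y ≤ z := by
  induction bs with
  | nil => cases hy
  | cons b bs ih =>
    intro z hz
    cases bs with
    | nil =>
      simp at hz hy
      omega
    | cons c cs =>
      rw [List.getLast?_cons_cons] at hz
      have hzmem : z ∈ c :: cs := List.mem_of_getLast? hz
      rcases List.mem_cons.mp hy with rfl | hy'
      · exact (List.pairwise_cons.mp h).1 _ hzmem
      · exact ih (List.pairwise_cons.mp h).2 hy' z hz

theorem valley_bound {x : Int} {xs : List Int} (hv : IsValley (x :: xs)) {y : Int}
    (hy : y ∈ x :: xs) : ∀ z ∈ (x :: xs).getLast?, y ≤ max x z := by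
  intro z hz
  obtain ⟨as, bs, heq, ha, hb⟩ := hv
  rcases (by rw [heq] at hy; exact List.mem_append.mp hy) with hyA | hyB
  · -- y in the non-increasing block: y ≤ as.head = x
    cases as with
    | nil => cases hyA
    | cons a as' =>
      have hx : a = x := by simpa using congrArg (·.head?) heq.symm
      subst hx
      rcases List.mem_cons.mp hyA with rfl | hy'
      · omega
      · have := (List.pairwise_cons.mp ha).1 _ hy'
        omega
  · -- y in the non-decreasing block: y ≤ bs.last = z
    have hz' : bs.getLast? = some z := by
      rw [heq, List.getLast?_append_of_ne_nil _ (List.ne_nil_of_mem hyB)] at hz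
      exact hz
    have := pairwise_le_getLast? hb hyB z hz'
    omega

theorem valley_cons {a : Int} {l : List Int} (hv : IsValley l)
    (hd : ∀ z ∈ l.head?, z ≤ a) : IsValley (a :: l) := by
  obtain ⟨as, bs, rfl, ha, hb⟩ := hv
  cases as with
  | nil => exact ⟨[a], bs, rfl, by simp, hb⟩
  | cons a0 as' =>
    have ha0 : a0 ≤ a := hd a0 (by simp)
    refine ⟨a :: a0 :: as', bs, rfl, ?_, hb⟩
    refine List.pairwise_cons.mpr ⟨?_, ha⟩
    intro z hz
    rcases List.mem_cons.mp hz with rfl | hz'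
    · omega
    · have := (List.pairwise_cons.mp ha).1 _ hz'
      omega

theorem valley_concat {a : Int} {l : List Int} (hv : IsValley l)
    (hd : ∀ z ∈ l.getLast?, z ≤ a) : IsValley (l ++ [a]) := by
  obtain ⟨as, bs, rfl, ha, hb⟩ := hv
  cases bs with
  | nil => exact ⟨as, [a], by simp, ha, by simp⟩
  | cons b bs' =>
    refine ⟨as, (b :: bs') ++ [a], by simp, ha, ?_⟩
    refine List.pairwise_append.mpr ⟨hb, by simp, ?_⟩
    intro z hz a' ha'
    have ha'' : a' = a := by simpa using ha'
    have hlast : ∀ w ∈ (b :: bs').getLast?, z ≤ w := pairwise_le_getLast? hb hz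
    obtain ⟨w, hw⟩ : ∃ w, (b :: bs').getLast? = some w :=
      Option.isSome_iff_exists.mp (List.getLast?_isSome.mpr (by simp))
    have hza : z ≤ w := hlast w hw
    have hwa : w ≤ a := by
      apply hd
      rw [List.getLast?_append_of_ne_nil _ (by simp : (b :: bs') ≠ [])]
      exact hw
    omega

-- B's loop decides "Pairwise ≤ from prev" in the rising state, "valley from prev" otherwise
theorem loopB_yes (lst : List Int) : ∀ p : Int,
    (stackableAltLoop lst true p = "Yes" ↔ (p :: lst).Pairwise (· ≤ ·)) ∧
    (stackableAltLoop lst false p = "Yes" ↔ IsValley (p :: lst)) := by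
  induction lst with
  | nil =>
    intro p
    refine ⟨?_, ?_⟩
    · simp [stackableAltLoop]
    · constructor
      · intro _
        exact ⟨[p], [], rfl, by simp, by simp⟩
      · intro _
        rfl
  | cons x xs ih =>
    intro p
    have ihx := ih x
    refine ⟨?_, ?_⟩
    · -- rising state
      by_cases hgt : x > p
      · rw [show stackableAltLoop (x :: xs) true p = stackableAltLoop xs true x by
          simp [stackableAltLoop, hgt]]
        rw [ihx.1]
        constructor
        · intro h
          refine List.pairwise_cons.mpr ⟨?_, h⟩
          intro z hz
          rcases List.mem_cons.mp hz with rfl | hz'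
          · omega
          · have := (List.pairwise_cons.mp h).1 _ hz'
            omega
        · exact fun h => (List.pairwise_cons.mp h).2
      · by_cases hlt : x < p
        · rw [show stackableAltLoop (x :: xs) true p = "No" by
            simp [stackableAltLoop, hgt, hlt]]
          constructor
          · intro h
            exact absurd h (by decide)
          · intro h
            have := (List.pairwise_cons.mp h).1 x (by simp)
            omega
        · have hxp : x = p := by omega
          rw [show stackableAltLoop (x :: xs) true p = stackableAltLoop xs true x by
            simp [stackableAltLoop, hgt, hlt]]
          rw [ihx.1]
          constructor
          · intro h
            refine List.pairwise_cons.mpr ⟨?_, h⟩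
            intro z hz
            rcases List.mem_cons.mp hz with rfl | hz'
            · omega
            · have := (List.pairwise_cons.mp h).1 _ hz'
              omega
          · exact fun h => (List.pairwise_cons.mp h).2
    · -- non-rising state
      by_cases hgt : x > p
      · rw [show stackableAltLoop (x :: xs) false p = stackableAltLoop xs true x by
          simp [stackableAltLoop, hgt]]
        rw [ihx.1]
        constructor
        · intro h
          exact ⟨[p], x :: xs, rfl, by simp, h⟩
        · rintro ⟨as, bs, heq, ha, hb⟩
          cases as with
          | nil =>
            rw [List.nil_append] at heq
            rw [← heq] at hb
            exact (List.pairwise_cons.mp hb).2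
          | cons a as' =>
            have hap : a = p := by simpa using congrArg (·.head?) heq.symm
            cases as' with
            | nil =>
              have hbs : bs = x :: xs := by
                have := congrArg List.tail heq
                simpa using this.symm
              rw [hbs] at hb
              exact hb
            | cons a2 as'' =>
              have ha2 : a2 = x := by
                have := congrArg (·.tail.head?) heq
                simpa using this.symm
              have hrel := (List.pairwise_cons.mp ha).1 a2 (by simp)
              omega
      · rw [show stackableAltLoop (x :: xs) false p = stackableAltLoop xs false x by
          simp [stackableAltLoop, hgt]]
        rw [ihx.2]
        constructor
        · intro h
          refine valley_cons h ?_
          intro z hz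
          simp at hz
          omega
        · intro h
          exact isValley_sublist (by simp) h

theorem loopB_cases (lst : List Int) (r : Bool) (p : Int) :
    stackableAltLoop lst r p = "Yes" ∨ stackableAltLoop lst r p = "No" := by
  induction lst generalizing r p with
  | nil => left; rfl
  | cons x xs ih =>
    simp only [stackableAltLoop]
    split_ifs
    · exact ih true x
    · right; rfl
    · exact ih r x

theorem loopA_cases (lst : List Int) (p : Int) :
    stackableLoop lst p = "Yes" ∨ stackableLoop lst p = "No" := by
  induction hn : lst.length using Nat.strong_induction_on generalizing lst p with
  | _ n ih =>
    cases lst with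
    | nil => left; simp [stackableLoop]
    | cons x xs =>
      simp only [stackableLoop]
      split_ifs
      · exact ih xs.length (by simp [← hn]) xs _ rfl
      · exact ih (x :: xs).dropLast.length
          (by simp [List.length_dropLast, ← hn]) _ _ rfl
      · right; rfl

-- computed forms of the head/last reads in the A-port
theorem pyHead_cons (x : Int) (xs : List Int) :
    (PySem.List.pyGet? (x :: xs) 0).getD 0 = x := by
  rw [PySem.List.pyGet?_zero_cons]; rfl

theorem pyLast_cons {x : Int} {xs : List Int} {L : Int}
    (hL : (x :: xs).getLast? = some L) :
    (PySem.List.pyGet? (x :: xs) (-1)).getD 0 = L := by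
  rw [PySem.List.pyGet?_neg_one, hL]
  rfl

-- A's loop succeeds from state (lst, prev) iff lst is a valley all of whose elements are ≤ prev
theorem loopA_yes (lst : List Int) (prev : Int) :
    stackableLoop lst prev = "Yes" ↔ (IsValley lst ∧ ∀ y ∈ lst, y ≤ prev) := by
  induction hn : lst.length using Nat.strong_induction_on generalizing lst prev with
  | _ n ih =>
    cases lst with
    | nil => simp [stackableLoop, isValley_nil]
    | cons x xs =>
      obtain ⟨L, hL⟩ : ∃ L, (x :: xs).getLast? = some L :=
        Option.isSome_iff_exists.mp (List.getLast?_isSome.mpr (by simp))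
      have hLmem : L ∈ x :: xs := List.mem_of_getLast? hL
      have hbound : ∀ y ∈ x :: xs, IsValley (x :: xs) → y ≤ max x L :=
        fun y hy hv => valley_bound hv hy L hL
      simp only [stackableLoop, pyHead_cons, pyLast_cons hL]
      by_cases hle : max x L ≤ prev
      · rw [if_pos hle]
        by_cases hhd : max x L = x
        · -- delete the head
          rw [if_pos hhd]
          rw [ih xs.length (by simp [← hn]) xs _ rfl]
          constructor
          · rintro ⟨hv, hb⟩
            refine ⟨valley_cons hv ?_, ?_⟩
            · intro z hz
              have hzmem : z ∈ xs := by
                cases xs with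
                | nil => cases hz
                | cons c cs => simp at hz; simp [hz]
              have := hb z hzmem
              omega
            · intro y hy
              rcases List.mem_cons.mp hy with rfl | hy'
              · omega
              · have := hb y hy'; omega
          · rintro ⟨hv, hb⟩
            refine ⟨isValley_sublist (by simp) hv, ?_⟩
            intro y hy
            have := hbound y (List.mem_cons_of_mem x hy) hv
            omega
        · -- delete the last element
          rw [if_neg hhd]
          rw [ih (x :: xs).dropLast.length (by simp [List.length_dropLast, ← hn]) _ _ rfl]
          have hsplit : (x :: xs).dropLast ++ [L] = x :: xs :=
            List.dropLast_append_getLast? L hL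
          constructor
          · rintro ⟨hv, hb⟩
            constructor
            · rw [← hsplit]
              refine valley_concat hv ?_
              intro z hz
              have hz' : z ∈ (x :: xs).dropLast := List.mem_of_getLast? hz
              have := hb z hz'
              omega
            · intro y hy
              rcases (by rw [← hsplit] at hy; exact List.mem_append.mp hy) with hy' | hy'
              · have := hb y hy'; omega
              · have : y = L := by simpa using hy'
                omega
          · rintro ⟨hv, hb⟩
            refine ⟨isValley_sublist (List.dropLast_sublist _) hv, ?_⟩
            intro y hy
            have := hbound y (List.mem_of_mem_dropLast hy) hv
            omega
      · rw [if_neg hle]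
        constructor
        · intro h
          exact absurd h (by decide)
        · rintro ⟨hv, hb⟩
          have hx := hb x (by simp)
          have hl := hb L hLmem
          omega

-- the top-level first deletion of A is exactly one unfolding of the loop with prev = max ends
theorem stackable_eq_loop (x : Int) (xs : List Int) :
    stackable (x :: xs) =
      stackableLoop (x :: xs)
        (max ((PySem.List.pyGet? (x :: xs) 0).getD 0) ((PySem.List.pyGet? (x :: xs) (-1)).getD 0)) := by
  simp only [stackable, stackableLoop, le_refl, if_pos]

theorem stackable_yes_iff (x : Int) (xs : List Int) :
    stackable (x :: xs) = "Yes" ↔ IsValley (x :: xs) := by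
  obtain ⟨L, hL⟩ : ∃ L, (x :: xs).getLast? = some L :=
    Option.isSome_iff_exists.mp (List.getLast?_isSome.mpr (by simp))
  rw [stackable_eq_loop, loopA_yes, pyHead_cons, pyLast_cons hL]
  constructor
  · exact fun h => h.1
  · intro h
    exact ⟨h, fun y hy => valley_bound h hy L hL⟩

-- ===== VERDICT (by name: the statement is the Claim_ definition above) =====
theorem stackable_spec : Claim_equal_stackable := by
  intro lst _ hpre
  unfold Spec_stackable
  cases lst with
  | nil => exact absurd rfl hpre
  | cons x xs =>
    have hB : stackable_alt (x :: xs) = "Yes" ↔ IsValley (x :: xs) := by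
      simpa [stackable_alt] using (loopB_yes xs x).2
    have hiff : stackable (x :: xs) = "Yes" ↔ stackable_alt (x :: xs) = "Yes" := by
      rw [stackable_yes_iff, hB]
    have hAc : stackable (x :: xs) = "Yes" ∨ stackable (x :: xs) = "No" := by
      rw [stackable_eq_loop]
      exact loopA_cases _ _
    have hBc : stackable_alt (x :: xs) = "Yes" ∨ stackable_alt (x :: xs) = "No" := by
      simp only [stackable_alt]
      exact loopB_cases xs false x
    rcases hAc with hA | hA <;> rcases hBc with hB' | hB'
    · rw [hA, hB']
    · exact absurd (hiff.mp hA) (by rw [hB']; decide)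
    · exact absurd (hiff.mpr hB') (by rw [hA]; decide)
    · rw [hA, hB']
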